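-- pv_equiv track=rewrite | github.com/allamurodxakimov/list_search | find02_max_count.py | find_max_count
-- ===== SOURCE A (Python) =====
-- def find_max_count(data):
--     """
--     Given the list of numbers, Find count of maximum numbers in the list
--     args:
--         data: list of numbers
--     returns: count of maximum numbers in the list
--     """
--     a=0
--     ma=data[0]
--     while a<len(data):
--         if data[a]>=ma:
--             ma=data[a]
--         a+=1
--     return data.count(ma)
-- ===== SOURCE B (Python) =====
-- def find_max_count(data):
--     ma = data[0]
--     count = 1
--     for x in data[1:]:
--         if x > ma:
--             ma = x
--             count = 1
--         elif x == ma: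
--             count += 1
--     return count
-- ===== Notes on version B (the rewrite author's own statement) =====
-- stated objective: faster
-- what changed: Fused the max-finding loop and the subsequent data.count pass into one traversal that tracks the running maximum and its occurrence count together.
import Mathlib
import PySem

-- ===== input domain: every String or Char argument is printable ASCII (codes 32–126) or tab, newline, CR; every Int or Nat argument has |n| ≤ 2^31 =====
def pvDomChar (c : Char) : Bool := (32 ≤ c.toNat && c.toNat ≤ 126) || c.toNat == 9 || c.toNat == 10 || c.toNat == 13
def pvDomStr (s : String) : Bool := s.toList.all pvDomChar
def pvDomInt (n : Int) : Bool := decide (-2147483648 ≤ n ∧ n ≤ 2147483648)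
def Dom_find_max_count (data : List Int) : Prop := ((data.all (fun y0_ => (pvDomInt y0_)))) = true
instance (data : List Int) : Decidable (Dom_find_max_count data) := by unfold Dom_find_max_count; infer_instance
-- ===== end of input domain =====

-- B fuses A's two passes (max-finding while loop, then data.count) into one traversal
-- tracking the running maximum together with its occurrence count.

-- ===== PORT A =====
-- A: ma = data[0]; while loop over indices a = 0..len-1 updates ma whenever data[a] >= ma
-- (a left fold over the whole list in order); then return data.count(ma).
def find_max_count (data : List Int) : Int :=
  match PySem.List.pyGet? data 0 with
  | none => 0   -- data[0] raises IndexError on []; excluded by Pre_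
  | some h =>
    let ma := data.foldl (fun ma x => if x ≥ ma then x else ma) h
    PySem.List.count data ma

-- ===== PORT B =====
-- B: ma = data[0], count = 1; one pass over data[1:] with state (ma, count).
def find_max_count_alt (data : List Int) : Int :=
  match data with
  | [] => 0     -- data[0] raises IndexError on []; excluded by Pre_
  | h :: t =>
    (t.foldl (fun (s : Int × Int) x =>
        if x > s.1 then (x, 1)
        else if x == s.1 then (s.1, s.2 + 1)
        else s) (h, 1)).2

-- ===== PRECONDITION & SPEC =====
-- A raises IndexError at data[0] on the empty list (and so does B); Pre_ excludes exactly that input.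
def Pre_find_max_count (data : List Int) : Prop := data ≠ []
instance (data : List Int) : Decidable (Pre_find_max_count data) := by unfold Pre_find_max_count; infer_instance
def pvWitness_find_max_count : List Int := ([3, 1, 3])

def Spec_find_max_count (data : List Int) (out : Int) : Prop := out = find_max_count_alt data
instance (data : List Int) (out : Int) : Decidable (Spec_find_max_count data out) := by unfold Spec_find_max_count; infer_instance

-- ===== CLAIM (what is proved, stated in full; the proofs are below) =====
def Claim_equal_find_max_count : Prop := ∀ (data : List Int), Dom_find_max_count data → Pre_find_max_count data → Spec_find_max_count data (find_max_count data)

-- ===== LEMMAS AND PROOFS =====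


theorem foldl_max_le (ys : List Int) (a : Int) :
    a ≤ ys.foldl (fun ma x => if x ≥ ma then x else ma) a := by
  induction ys generalizing a with
  | nil => simp
  | cons z zs ihz =>
    simp only [List.foldl_cons]
    by_cases h : z ≥ a
    · simp only [if_pos h]; exact le_trans h (ihz z)
    · simp only [if_neg h]; exact ihz a

theorem fused_invariant (xs : List Int) (m c : Int) :
    (xs.foldl (fun (s : Int × Int) x =>
        if x > s.1 then (x, 1)
        else if x == s.1 then (s.1, s.2 + 1)
        else s) (m, c)) =
    (xs.foldl (fun ma x => if x ≥ ma then x else ma) m,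
     (if xs.foldl (fun ma x => if x ≥ ma then x else ma) m = m then c else 0)
       + (PySem.List.count xs (xs.foldl (fun ma x => if x ≥ ma then x else ma) m))) := by
  induction xs generalizing m c with
  | nil => simp [PySem.List.count]
  | cons y ys ih =>
    simp only [List.foldl_cons, PySem.List.count] at *
    by_cases h1 : y > m
    · have hy : y ≥ m := le_of_lt h1
      rw [show (if y > (m, c).1 then (y, (1 : Int))
            else if y == (m, c).1 then ((m, c).1, (m, c).2 + 1) else (m, c)) = (y, 1) by
          simp [h1]]
      simp only [show (if y ≥ m then y else m) = y from if_pos hy]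
      rw [ih y 1]
      have hM := foldl_max_le ys y
      refine Prod.ext_iff.mpr ⟨rfl, ?_⟩
      simp only [List.count_cons, beq_iff_eq]
      split_ifs <;> omega
    · by_cases h2 : y = m
      · subst h2
        rw [show (if y > (y, c).1 then (y, (1 : Int))
              else if y == (y, c).1 then ((y, c).1, (y, c).2 + 1) else (y, c)) = (y, c + 1) by
            simp]
        simp only [show (if y ≥ y then y else y) = y from if_pos (le_refl y)]
        rw [ih y (c + 1)]
        refine Prod.ext_iff.mpr ⟨rfl, ?_⟩
        simp only [List.count_cons, beq_iff_eq]
        split_ifs <;> omega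
      · have hy : ¬ (y ≥ m) := by omega
        rw [show (if y > (m, c).1 then (y, (1 : Int))
              else if y == (m, c).1 then ((m, c).1, (m, c).2 + 1) else (m, c)) = (m, c) by
            simp [h1, h2]]
        simp only [show (if y ≥ m then y else m) = m from if_neg hy]
        rw [ih m c]
        have hM := foldl_max_le ys m
        refine Prod.ext_iff.mpr ⟨rfl, ?_⟩
        simp only [List.count_cons, beq_iff_eq]
        split_ifs <;> omega

-- ===== VERDICT (by name: the statement is the Claim_ definition above) =====
theorem find_max_count_spec : Claim_equal_find_max_count := by
  intro data _ hpre
  match data with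
  | [] => exact absurd rfl hpre
  | h :: t =>
    show find_max_count (h :: t) = find_max_count_alt (h :: t)
    simp only [find_max_count, find_max_count_alt]
    rw [show PySem.List.pyGet? (h :: t) 0 = some h by
      simp [PySem.List.pyGet?, PySem.List.pyIdx?]]
    rw [fused_invariant]
    simp only [List.foldl_cons]
    simp only [show (if h ≥ h then h else h) = h from if_pos (le_refl h)]
    have hM := foldl_max_le t h
    set M := t.foldl (fun ma x => if x ≥ ma then x else ma) h with hMdef
    simp only [PySem.List.count, List.count_cons, beq_iff_eq]
    split_ifs <;> omega
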